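-- pv_equiv track=rewrite | github.com/ishitachaturvedi/gpgpu-sim_distribution | fast_v2_indep_SM_sched.py | init_six_final
-- ===== SOURCE A (Python) =====
-- def init_six_final(numStalls):
--     warp_six_c = []
--     for i in range(numStalls):
--         stall1 = []
--         for j in range(i+1,numStalls):
--             stall2 = []
--             for k in range(j+1,numStalls):
--                 stall3 = []
--                 for k1 in range(k+1,numStalls):
--                     stall4 = []
--                     for k2 in range(k1+1,numStalls):
--                         stall5 = []
--                         for k3 in range(k2+1,numStalls):
--                             temp1=[]
--                             temp1.append(0)
--                             temp1.append(0)
--                             stall5.append(temp1)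
--                         stall4.append(stall5)
--                     stall3.append(stall4)
--                 stall2.append(stall3)
--             stall1.append(stall2)
--         warp_six_c.append(stall1)
--     return warp_six_c
-- ===== SOURCE B (Python) =====
-- def init_six_final(numStalls):
--     def build(start, depth):
--         out = []
--         for idx in range(start, numStalls):
--             if depth == 1:
--                 out.append([0, 0])
--             else:
--                 out.append(build(idx + 1, depth - 1))
--         return out
--     return build(0, 6)
-- ===== Notes on version B (the rewrite author's own statement) =====
-- stated objective: simpler
-- what changed: Replaces the six hand-unrolled nested loops by one recursive helper build(start, depth) over the nested combinatorial structure.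
import Mathlib
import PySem

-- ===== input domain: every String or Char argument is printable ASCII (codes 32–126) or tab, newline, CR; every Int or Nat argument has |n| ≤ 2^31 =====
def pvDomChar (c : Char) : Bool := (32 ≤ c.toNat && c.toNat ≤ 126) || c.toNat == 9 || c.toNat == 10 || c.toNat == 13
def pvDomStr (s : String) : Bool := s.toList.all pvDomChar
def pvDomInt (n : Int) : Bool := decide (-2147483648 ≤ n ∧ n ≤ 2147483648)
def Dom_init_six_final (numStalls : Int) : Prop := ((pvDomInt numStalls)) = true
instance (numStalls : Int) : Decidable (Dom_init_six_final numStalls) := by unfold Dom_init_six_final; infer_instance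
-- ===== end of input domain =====

-- B replaces A's six hand-unrolled nested loops by one recursive helper over (start, depth); same values, simpler code.


-- ===== PORT A =====
-- literal transliteration: each 'for … append' loop is a foldl appending to its accumulator;
-- temp1 = [] ; temp1.append(0) ; temp1.append(0)  gives the literal [0, 0]
def init_six_final (numStalls : Int) : List (List (List (List (List (List (List Int)))))) :=
  List.foldl (fun warp_six_c i =>
    warp_six_c ++ [List.foldl (fun stall1 j =>
      stall1 ++ [List.foldl (fun stall2 k =>
        stall2 ++ [List.foldl (fun stall3 k1 =>
          stall3 ++ [List.foldl (fun stall4 k2 =>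
            stall4 ++ [List.foldl (fun stall5 _k3 =>
              stall5 ++ [[(0 : Int), 0]]) [] (PySem.List.pyRange (k2+1) numStalls 1)])
            [] (PySem.List.pyRange (k1+1) numStalls 1)])
          [] (PySem.List.pyRange (k+1) numStalls 1)])
        [] (PySem.List.pyRange (j+1) numStalls 1)])
      [] (PySem.List.pyRange (i+1) numStalls 1)])
    [] (PySem.List.pyRange 0 numStalls 1)

-- ===== PORT B =====
-- pvNL d is the result type of Source B's build at depth d (pvNL 0 = the [0,0] leaf)
def pvNL : Nat → Type
  | 0 => List Int
  | n+1 => List (pvNL n)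

-- Source B's build(start, depth): one loop over range(start, numStalls); depth==1 appends the leaf [0,0]
def pvBuild (numStalls : Int) : (depth : Nat) → (start : Int) → pvNL depth
  | 0, _ => [(0 : Int), 0]
  | d+1, start =>
      (List.foldl (fun (out : List (pvNL d)) idx => out ++ [pvBuild numStalls d (idx + 1)])
        [] (PySem.List.pyRange start numStalls 1) : List (pvNL d))

def init_six_final_alt (numStalls : Int) : List (List (List (List (List (List (List Int)))))) :=
  pvBuild numStalls 6 0

-- ===== PRECONDITION & SPEC =====
abbrev PvOut : Type := List (List (List (List (List (List (List Int))))))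
def Spec_init_six_final (numStalls : Int) (out : List (List (List (List (List (List (List Int))))))) : Prop := out = init_six_final_alt numStalls
instance (numStalls : Int) (out : PvOut) : Decidable (Spec_init_six_final numStalls out) := by unfold Spec_init_six_final; infer_instance

-- ===== CLAIM (what is proved, stated in full; the proofs are below) =====
def Claim_equal_init_six_final : Prop := ∀ (numStalls : Int), Dom_init_six_final numStalls → Spec_init_six_final numStalls (init_six_final numStalls)

-- ===== LEMMAS AND PROOFS =====
theorem pv_foldl_app_map {α β : Type} (f : α → β) (l : List α) (acc : List β) :
    List.foldl (fun a x => a ++ [f x]) acc l = acc ++ l.map f := by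
  induction l generalizing acc with
  | nil => simp
  | cons x xs ih => simp [List.foldl, ih]

-- ===== VERDICT (by name: the statement is the Claim_ definition above) =====
theorem init_six_final_spec : Claim_equal_init_six_final := by
  intro n _
  show init_six_final n = init_six_final_alt n
  simp only [init_six_final, init_six_final_alt, pv_foldl_app_map, List.nil_append,
    pvBuild]
  rfl
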